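-- pv_equiv track=rewrite | github.com/MBenaventeC/Web-MIBC | T3_web/flask_app/utils/validations.py | validate_fv_opc
-- ===== SOURCE A (Python) =====
-- def validate_fv_opc(fv, opcionesFV):
--     if len(opcionesFV) == 0 or len(opcionesFV) > 5:
--         return False
--     else:
--
--         # Separar la cadena en una lista de cadenas individuales
--         id_list_str = opcionesFV[0].split(',')
--
--         # Convertir la lista de cadenas en una lista de enteros
--         id_list_int = list(map(int, id_list_str))
--
--         for opcion in id_list_int:
--             if opcion > 62 or (fv == "fruta" and opcion > 37) or (fv == "verdura" and opcion < 38):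
--                 return False
--     return True
-- ===== SOURCE B (Python) =====
-- def validate_fv_opc(fv, opcionesFV):
--     if len(opcionesFV) == 0 or len(opcionesFV) > 5:
--         return False
--     ids = sorted(map(int, opcionesFV[0].split(',')))
--     lo, hi = {"fruta": (None, 37), "verdura": (38, 62)}.get(fv, (None, 62))
--     return (lo is None or ids[0] >= lo) and ids[-1] <= hi
-- ===== Notes on version B (the rewrite author's own statement) =====
-- stated objective: alternative
-- what changed: Replaces A's per-element early-returning scan with sort-then-endpoints: the parsed ids are sorted and only the smallest and largest are compared against bounds taken from a table keyed by fv.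
import Mathlib
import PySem

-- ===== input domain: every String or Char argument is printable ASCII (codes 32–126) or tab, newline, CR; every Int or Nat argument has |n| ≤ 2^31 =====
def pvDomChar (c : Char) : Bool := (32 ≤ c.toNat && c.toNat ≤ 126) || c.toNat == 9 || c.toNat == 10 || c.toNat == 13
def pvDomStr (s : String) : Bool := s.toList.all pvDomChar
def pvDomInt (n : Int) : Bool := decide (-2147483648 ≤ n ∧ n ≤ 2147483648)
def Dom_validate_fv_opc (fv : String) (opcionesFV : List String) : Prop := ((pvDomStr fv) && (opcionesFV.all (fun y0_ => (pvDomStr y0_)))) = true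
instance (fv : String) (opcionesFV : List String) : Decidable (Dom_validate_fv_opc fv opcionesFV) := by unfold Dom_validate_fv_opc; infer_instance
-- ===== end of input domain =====

-- B replaces A's per-element early-return scan by sort-then-endpoints with a bounds table keyed by fv (objective: alternative).

-- ===== PORT A =====
-- the for-loop of A: early return False on a bad option, True after the last element
def validateLoopA (fv : String) : List Int → Bool
  | [] => true
  | o :: rest =>
      if 62 < o ∨ (fv == "fruta" ∧ 37 < o) ∨ (fv == "verdura" ∧ o < 38) then false
      else validateLoopA fv rest

def validate_fv_opc (fv : String) (opcionesFV : List String) : Bool :=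
  if opcionesFV.length = 0 ∨ 5 < opcionesFV.length then false
  else
    -- opcionesFV[0] is in range here (length ≥ 1), so headD is exact
    match ((PySem.Str.split? (opcionesFV.headD "") ",").getD []).mapM PySem.Int.ofStr? with
    | none => false          -- int() raised ValueError; excluded by Pre_
    | some id_list_int => validateLoopA fv id_list_int

-- ===== PORT B =====
def validate_fv_opc_alt (fv : String) (opcionesFV : List String) : Bool :=
  if opcionesFV.length = 0 ∨ 5 < opcionesFV.length then false
  else
    match ((PySem.Str.split? (opcionesFV.headD "") ",").getD []).mapM PySem.Int.ofStr? with
    | none => false          -- int() raised ValueError; excluded by Pre_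
    | some raw =>
      let ids := PySem.List.sorted raw (fun x => x) false
      let lohi : Option Int × Int :=
        PySem.Dict.getD
          (PySem.Dict.mk [("fruta", ((none : Option Int), (37 : Int))), ("verdura", (some 38, 62))])
          fv ((none : Option Int), (62 : Int))
      match PySem.List.pyGet? ids 0, PySem.List.pyGet? ids (-1) with
      | some first, some last =>
          (match lohi.1 with | none => true | some lo => decide (lo ≤ first)) && decide (last ≤ lohi.2)
      | _, _ => false        -- unreachable: split(',') never yields an empty list, so ids ≠ []

-- ===== PRECONDITION & SPEC =====
-- Pre_ excludes exactly the inputs where int() raises ValueError (a comma piece of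
-- opcionesFV[0] is not an int literal) when the length guard lets A reach the parse;
-- both A and B raise there.
def Pre_validate_fv_opc (fv : String) (opcionesFV : List String) : Prop :=
  (1 ≤ opcionesFV.length ∧ opcionesFV.length ≤ 5) →
    (((PySem.Str.split? (opcionesFV.headD "") ",").getD []).all
      (fun s => (PySem.Int.ofStr? s).isSome)) = true
instance (fv : String) (opcionesFV : List String) : Decidable (Pre_validate_fv_opc fv opcionesFV) := by
  unfold Pre_validate_fv_opc; infer_instance

def pvWitness_validate_fv_opc : String × List String := ("fruta", ["1,37", "x"])

def Spec_validate_fv_opc (fv : String) (opcionesFV : List String) (out : Bool) : Prop := out = validate_fv_opc_alt fv opcionesFV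
instance (fv : String) (opcionesFV : List String) (out : Bool) : Decidable (Spec_validate_fv_opc fv opcionesFV out) := by unfold Spec_validate_fv_opc; infer_instance

-- ===== CLAIM (what is proved, stated in full; the proofs are below) =====
def Claim_equal_validate_fv_opc : Prop := ∀ (fv : String) (opcionesFV : List String), Dom_validate_fv_opc fv opcionesFV → Pre_validate_fv_opc fv opcionesFV → Spec_validate_fv_opc fv opcionesFV (validate_fv_opc fv opcionesFV)

-- ===== LEMMAS AND PROOFS =====

theorem splitOn_go_ne_nil (sep : List Char) (fuel : Nat) (l cur : List Char)
    (acc : List (List Char)) : PySem.Chars.splitOn.go sep fuel l cur acc ≠ [] := by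
  induction fuel generalizing l cur acc with
  | zero => simp [PySem.Chars.splitOn.go]
  | succ n ih =>
      cases l with
      | nil => simp [PySem.Chars.splitOn.go]
      | cons c rest =>
          rw [PySem.Chars.splitOn.go]
          split
          · exact ih _ _ _
          · exact ih _ _ _

theorem split?_comma_ne_nil (s : String) (ps : List String)
    (h : PySem.Str.split? s "," = some ps) : ps ≠ [] := by
  intro hnil
  subst hnil
  simp [PySem.Str.split?, PySem.Chars.split?, PySem.Chars.splitOn] at h
  exact splitOn_go_ne_nil _ _ _ _ _ h

theorem mapM_some_of_all (l : List String)
    (hall : (l.all fun s => (PySem.Int.ofStr? s).isSome) = true) :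
    ∃ ids : List Int, l.mapM PySem.Int.ofStr? = some ids ∧ ids.length = l.length := by
  induction l with
  | nil => exact ⟨[], by simp, rfl⟩
  | cons a t ih =>
      simp only [List.all_cons, Bool.and_eq_true] at hall
      obtain ⟨i, hi⟩ := Option.isSome_iff_exists.mp hall.1
      obtain ⟨ids, hids, hlen⟩ := ih hall.2
      exact ⟨i :: ids, by simp [List.mapM_cons, hi, hids], by simp [hlen]⟩

theorem validateLoopA_eq_all (fv : String) (ids : List Int) :
    validateLoopA fv ids =
      ids.all (fun o => !(decide (62 < o) || (fv == "fruta" && decide (37 < o)) ||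
        (fv == "verdura" && decide (o < 38)))) := by
  induction ids with
  | nil => rfl
  | cons o t ih =>
      rw [validateLoopA, List.all_cons, ih]
      by_cases h : 62 < o ∨ (fv == "fruta" ∧ 37 < o) ∨ (fv == "verdura" ∧ o < 38)
      · rw [if_pos h]
        rcases h with h | ⟨h1, h2⟩ | ⟨h1, h2⟩ <;> simp [*]
      · rw [if_neg h]
        push Not at h
        rcases h with ⟨h1, h2, h3⟩
        by_cases hf : fv == "fruta" <;> by_cases hv : fv == "verdura" <;>
          simp_all [not_lt.mpr]

-- a (·≤·)-pairwise nonempty list: every element lies between its head and its last element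
theorem pairwise_le_getLast (s : List Int) (hs : s.Pairwise (· ≤ ·)) (hne : s ≠ []) :
    ∀ o ∈ s, o ≤ s.getLast hne := by
  induction s with
  | nil => simp
  | cons a t ih =>
      intro o ho
      rcases List.pairwise_cons.mp hs with ⟨ha, ht⟩
      cases t with
      | nil => simp at ho; simp [ho, List.getLast]
      | cons b u =>
          rw [List.getLast_cons (by simp)]
          rcases List.mem_cons.mp ho with rfl | ho
          · exact le_trans (ha b (by simp)) (ih ht (by simp) b (by simp))
          · exact ih ht (by simp) o ho

theorem pairwise_head_le (f : Int) (t : List Int) (hs : (f :: t).Pairwise (· ≤ ·)) :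
    ∀ o ∈ f :: t, f ≤ o := by
  intro o ho
  rcases List.mem_cons.mp ho with rfl | ho
  · exact le_refl o
  · exact (List.pairwise_cons.mp hs).1 o ho

-- ===== VERDICT (by name: the statement is the Claim_ definition above) =====
theorem validate_fv_opc_spec : Claim_equal_validate_fv_opc := by
  intro fv opc _dom pre
  unfold Spec_validate_fv_opc validate_fv_opc validate_fv_opc_alt
  by_cases h : 1 ≤ opc.length ∧ opc.length ≤ 5
  · rw [if_neg (by omega), if_neg (by omega)]
    have hall := pre h
    cases hsplit : PySem.Str.split? (opc.headD "") "," with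
    | none => simp [PySem.Str.split?, PySem.Chars.split?] at hsplit
    | some ps =>
        rw [hsplit, Option.getD_some] at hall
        simp only [Option.getD_some]
        obtain ⟨raw, hraw, hlen⟩ := mapM_some_of_all ps hall
        rw [hraw]
        dsimp only
        have hrawne : raw ≠ [] := by
          intro hnil
          exact split?_comma_ne_nil _ _ hsplit
            (List.length_eq_zero_iff.mp (hnil ▸ hlen).symm)
        set s := PySem.List.sorted raw (fun x => x) false with hsdef
        have hperm : s.Perm raw := PySem.List.sorted_perm raw (fun x => x) false
        have hpw : s.Pairwise (· ≤ ·) := PySem.List.sorted_pairwise raw (fun x => x)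
        have hsne : s ≠ [] := by
          intro hnil
          exact hrawne (List.Perm.eq_nil (hnil ▸ hperm).symm)
        obtain ⟨f, t, hst⟩ := List.exists_cons_of_ne_nil hsne
        rw [validateLoopA_eq_all]
        have hget0 : PySem.List.pyGet? s 0 = some f := by
          rw [hst]; exact PySem.List.pyGet?_zero_cons f t
        have hgetm1 : PySem.List.pyGet? s (-1) = some (s.getLast hsne) := by
          rw [PySem.List.pyGet?_neg_one, List.getLast?_eq_getLast hsne]
        simp only [hget0, hgetm1]
        have hmem : ∀ o : Int, o ∈ raw ↔ o ∈ s := fun o => (hperm.mem_iff).symm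
        have hlast_mem : s.getLast hsne ∈ raw := (hmem _).mpr (List.getLast_mem hsne)
        have hf_mem : f ∈ raw := (hmem f).mpr (hst ▸ List.mem_cons_self)
        have hub : ∀ c : Int, (∀ o ∈ raw, o ≤ c) ↔ s.getLast hsne ≤ c := by
          intro c
          constructor
          · intro hc; exact hc _ hlast_mem
          · intro hc o ho
            exact le_trans (pairwise_le_getLast s hpw hsne o ((hmem o).mp ho)) hc
        have hlb : ∀ lo : Int, (∀ o ∈ raw, lo ≤ o) ↔ lo ≤ f := by
          intro lo
          constructor
          · intro hc; exact hc _ hf_mem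
          · intro hc o ho
            exact le_trans hc (pairwise_head_le f t (hst ▸ hpw) o (hst ▸ (hmem o).mp ho))
        rw [Bool.eq_iff_iff]
        by_cases hfr : fv = "fruta"
        · subst hfr
          rw [show (PySem.Dict.mk [("fruta", ((none : Option Int), (37 : Int))), ("verdura", ((some 38 : Option Int), (62 : Int)))]).getD "fruta" ((none : Option Int), (62 : Int)) = ((none : Option Int), (37 : Int)) from by decide]
          simp only [List.all_eq_true]
          simp
          constructor
          · intro hA; exact (hub 37).mp fun o ho => (hA o ho).2
          · intro hB o ho
            exact ⟨by have := (hub 37).mpr hB o ho; omega, (hub 37).mpr hB o ho⟩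
        · by_cases hvd : fv = "verdura"
          · subst hvd
            rw [show (PySem.Dict.mk [("fruta", ((none : Option Int), (37 : Int))), ("verdura", ((some 38 : Option Int), (62 : Int)))]).getD "verdura" ((none : Option Int), (62 : Int)) = ((some 38 : Option Int), (62 : Int)) from by decide]
            simp only [List.all_eq_true]
            simp
            constructor
            · intro hA
              exact ⟨(hlb 38).mp fun o ho => (hA o ho).2, (hub 62).mp fun o ho => (hA o ho).1⟩
            · intro hB o ho
              exact ⟨(hub 62).mpr hB.2 o ho, (hlb 38).mpr hB.1 o ho⟩
          · rw [show (PySem.Dict.mk [("fruta", ((none : Option Int), (37 : Int))), ("verdura", ((some 38 : Option Int), (62 : Int)))]).getD fv ((none : Option Int), (62 : Int)) = ((none : Option Int), (62 : Int)) from by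
                simp [PySem.Dict.getD, PySem.Dict.get?_mk_cons, PySem.Dict.get?, beq_iff_eq, Ne.symm hfr, Ne.symm hvd]]
            simp only [List.all_eq_true]
            simp
            constructor
            · intro hA; exact (hub 62).mp fun o ho => (hA o ho).1.1
            · intro hB o ho
              exact ⟨⟨(hub 62).mpr hB o ho, Or.inl hfr⟩, Or.inl hvd⟩
  · rw [if_pos (by omega), if_pos (by omega)]
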